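-- pv_equiv track=rewrite | github.com/peterjfreed/conservationofzero | c3z_mass_adjacent_centrad_repro_v1.py | simulate_cpt_closure
-- ===== SOURCE A (Python) =====
-- MOD6 = lambda x: x % 6
--
-- def simulate_cpt_closure(word):
--     """Odd m → (T3, bits 11); Even m → (T0, bits 00).  (CPT closure)"""
--     T=0; s=0; i=0
--     for (g,d) in word:
--         if d==+1:
--             if T!=g: return False
--             T=MOD6(T+1)
--         else:
--             if T!=MOD6(g+1): return False
--             T=MOD6(T-1)
--         s^=1; i^=1
--     m=len(word)
--     if (m%2)==0:  return (T==0 and s==0 and i==0)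
--     else:         return (T==3 and s==1 and i==1)
-- ===== SOURCE B (Python) =====
-- def simulate_cpt_closure(word):
--     # Pass 1: running net displacements (pre-step raw sums), built front-to-back.
--     pre = [0]
--     for _, d in word:
--         pre.append(pre[-1] + (1 if d == 1 else -1))
--     # Pass 2: validate every letter against its precomputed pre-step state.
--     ok = all((g == t % 6) if d == 1 else (t % 6 == (g + 1) % 6)
--              for (g, d), t in zip(word, pre))
--     # Closed-form final check: s and i always equal len(word) % 2.
--     target = 0 if len(word) % 2 == 0 else 3
--     return ok and pre[-1] % 6 == target
-- ===== Notes on version B (the rewrite author's own statement) =====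
-- stated objective: simpler
-- what changed: A's single stateful scan (state T plus redundant bits s,i with early returns) is replaced by building the list of pre-step net displacements, a separate all() validation pass against that table, and a closed-form parity check (target 0 for even length, 3 for odd) instead of tracking s and i.
import Mathlib
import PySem

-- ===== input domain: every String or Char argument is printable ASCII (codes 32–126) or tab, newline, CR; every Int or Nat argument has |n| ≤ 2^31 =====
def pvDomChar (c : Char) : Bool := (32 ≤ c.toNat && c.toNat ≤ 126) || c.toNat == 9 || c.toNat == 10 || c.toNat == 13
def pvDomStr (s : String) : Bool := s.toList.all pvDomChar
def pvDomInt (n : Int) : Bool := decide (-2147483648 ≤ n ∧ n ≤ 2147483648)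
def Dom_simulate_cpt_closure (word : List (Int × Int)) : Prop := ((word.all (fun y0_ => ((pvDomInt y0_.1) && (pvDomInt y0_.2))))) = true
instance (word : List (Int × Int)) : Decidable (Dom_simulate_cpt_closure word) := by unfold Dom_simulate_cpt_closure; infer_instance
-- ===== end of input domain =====

-- B separates A's single stateful scan into: (1) building the list of pre-step
-- running displacements, (2) an all() validation pass against that table, and
-- (3) a closed-form parity check replacing the s/i bit tracking. Objective: simpler.

-- ===== PORT A =====
def MOD6 (x : Int) : Int := PySem.Int.mod x 6

-- the for-loop of A: state (T, s, i); early 'return False' = none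
def simA_loop : Int → Int → Int → List (Int × Int) → Option (Int × Int × Int)
  | T, s, i, [] => some (T, s, i)
  | T, s, i, (g, d) :: rest =>
    if d = 1 then
      if T ≠ g then none
      else simA_loop (MOD6 (T + 1)) (PySem.Int.bxor s 1) (PySem.Int.bxor i 1) rest
    else
      if T ≠ MOD6 (g + 1) then none
      else simA_loop (MOD6 (T - 1)) (PySem.Int.bxor s 1) (PySem.Int.bxor i 1) rest

def simulate_cpt_closure (word : List (Int × Int)) : Bool :=
  match simA_loop 0 0 0 word with
  | none => false
  | some (T, s, i) =>
    let m : Int := word.length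
    if PySem.Int.mod m 2 = 0 then (T == 0 && s == 0 && i == 0)
    else (T == 3 && s == 1 && i == 1)

-- ===== PORT B =====
-- pre[1..]: each appended value is previous + (1 if d==1 else -1)
def preList : Int → List (Int × Int) → List Int
  | _, [] => []
  | t, (_, d) :: rest =>
    let t' := t + (if d = 1 then 1 else -1)
    t' :: preList t' rest

def checkLetter (p : (Int × Int) × Int) : Bool :=
  if p.1.2 = 1 then p.1.1 == PySem.Int.mod p.2 6
  else PySem.Int.mod p.2 6 == PySem.Int.mod (p.1.1 + 1) 6

def simulate_cpt_closure_alt (word : List (Int × Int)) : Bool :=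
  let pre := 0 :: preList 0 word
  let ok := (word.zip pre).all checkLetter
  let target : Int := if PySem.Int.mod (word.length : Int) 2 = 0 then 0 else 3
  ok && (PySem.Int.mod (pre.getLastD 0) 6 == target)

-- ===== PRECONDITION & SPEC =====
def Spec_simulate_cpt_closure (word : List (Int × Int)) (out : Bool) : Prop := out = simulate_cpt_closure_alt word
instance (word : List (Int × Int)) (out : Bool) : Decidable (Spec_simulate_cpt_closure word out) := by unfold Spec_simulate_cpt_closure; infer_instance

-- ===== CLAIM (what is proved, stated in full; the proofs are below) =====
def Claim_equal_simulate_cpt_closure : Prop := ∀ (word : List (Int × Int)), Dom_simulate_cpt_closure word → Spec_simulate_cpt_closure word (simulate_cpt_closure word)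

-- ===== LEMMAS AND PROOFS =====

-- net displacement of a word
def net : List (Int × Int) → Int
  | [] => 0
  | (_, d) :: rest => (if d = 1 then 1 else -1) + net rest

-- value of s (= i) after n toggles starting from s
def parFlip (s : Int) (n : Nat) : Int := if n % 2 = 0 then s else 1 - s

lemma bxor_one (s : Int) (hs : s = 0 ∨ s = 1) : PySem.Int.bxor s 1 = 1 - s := by
  rcases hs with h | h <;> subst h <;> decide

lemma parFlip_step (s : Int) (n : Nat) : parFlip (1 - s) n = parFlip s (n + 1) := by
  unfold parFlip
  rcases Nat.even_or_odd n with h | h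
  · have h0 : n % 2 = 0 := Nat.even_iff.mp h
    have h1 : (n + 1) % 2 = 1 := by omega
    simp [h0, h1]
  · have h0 : n % 2 = 1 := Nat.odd_iff.mp h
    have h1 : (n + 1) % 2 = 0 := by omega
    simp [h0, h1]

lemma mod6_shift (t c : Int) : PySem.Int.mod (PySem.Int.mod t 6 + c) 6 = PySem.Int.mod (t + c) 6 := by
  rw [PySem.Int.mod_eq_emod_of_pos (by norm_num : (0:Int) < 6),
      PySem.Int.mod_eq_emod_of_pos (by norm_num : (0:Int) < 6),
      PySem.Int.mod_eq_emod_of_pos (by norm_num : (0:Int) < 6)]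
  conv_rhs => rw [Int.add_emod]
  conv_lhs => rw [Int.add_emod, Int.emod_emod_of_dvd _ (dvd_refl 6)]

lemma getLastD_preList (w : List (Int × Int)) : ∀ (t dflt : Int),
    (t :: preList t w).getLastD dflt = t + net w := by
  induction w with
  | nil => intro t dflt; simp [preList, net]
  | cons hd tl ih =>
    intro t dflt
    obtain ⟨g, d⟩ := hd
    simp only [preList, net]
    rw [List.getLastD_cons]
    rw [ih (t + (if d = 1 then 1 else -1)) t]
    ring

lemma loop_eq (w : List (Int × Int)) : ∀ (t s : Int), (s = 0 ∨ s = 1) →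
    simA_loop (PySem.Int.mod t 6) s s w =
      if (w.zip (t :: preList t w)).all checkLetter
      then some (PySem.Int.mod (t + net w) 6, parFlip s w.length, parFlip s w.length)
      else none := by
  induction w with
  | nil =>
    intro t s _
    simp [simA_loop, preList, net, parFlip]
  | cons hd tl ih =>
    intro t s hs
    obtain ⟨g, d⟩ := hd
    have hs' : 1 - s = 0 ∨ 1 - s = 1 := by omega
    have ih1 := ih (t + 1) (1 - s) hs'
    have ihm := ih (t + -1) (1 - s) hs'
    by_cases hd1 : d = 1
    · simp only [simA_loop, preList, net, List.zip_cons_cons, List.all_cons, List.length_cons,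
        checkLetter, bxor_one s hs, MOD6, hd1, if_true, mod6_shift]
      by_cases hg : PySem.Int.mod t 6 = g
      · have hb : (g == PySem.Int.mod t 6) = true := beq_iff_eq.mpr hg.symm
        rw [if_neg (not_ne_iff.mpr hg), ih1, parFlip_step]
        simp only [hb, Bool.true_and]
        rw [show t + 1 + net tl = t + (1 + net tl) by ring]
      · have hb : (g == PySem.Int.mod t 6) = false := by
          rw [beq_eq_false_iff_ne]; intro h; exact hg h.symm
        rw [if_pos hg]
        simp only [hb, Bool.false_and, Bool.false_eq_true, if_false]
    · simp only [simA_loop, preList, net, List.zip_cons_cons, List.all_cons, List.length_cons,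
        checkLetter, bxor_one s hs, MOD6, hd1, if_false, mod6_shift]
      by_cases hg : PySem.Int.mod t 6 = PySem.Int.mod (g + 1) 6
      · have hb : (PySem.Int.mod t 6 == PySem.Int.mod (g + 1) 6) = true := beq_iff_eq.mpr hg
        rw [if_neg (not_ne_iff.mpr hg), show PySem.Int.mod t 6 - 1 = PySem.Int.mod t 6 + -1 by ring,
            mod6_shift, ihm, parFlip_step]
        simp only [hb, Bool.true_and]
        rw [show t + -1 + net tl = t + (-1 + net tl) by ring]
      · have hb : (PySem.Int.mod t 6 == PySem.Int.mod (g + 1) 6) = false := by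
          rw [beq_eq_false_iff_ne]; exact hg
        rw [if_pos hg]
        simp only [hb, Bool.false_and, Bool.false_eq_true, if_false]

-- ===== VERDICT (by name: the statement is the Claim_ definition above) =====
theorem simulate_cpt_closure_spec : Claim_equal_simulate_cpt_closure := by
  intro word _
  unfold Spec_simulate_cpt_closure simulate_cpt_closure simulate_cpt_closure_alt
  rw [show simA_loop 0 0 0 word = simA_loop (PySem.Int.mod 0 6) 0 0 word from rfl,
      loop_eq word 0 0 (Or.inl rfl)]
  simp only [getLastD_preList, zero_add]
  by_cases hok : (word.zip (0 :: preList 0 word)).all checkLetter = true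
  · rw [if_pos hok]
    simp only [hok, Bool.true_and]
    have hm : PySem.Int.mod (word.length : Int) 2 = ((word.length % 2 : Nat) : Int) := by
      exact_mod_cast PySem.Int.mod_natCast word.length 2
    by_cases he : word.length % 2 = 0
    · have hc : PySem.Int.mod (word.length : Int) 2 = 0 := by rw [hm, he]; rfl
      simp only [hc, parFlip, he, if_true]
      simp
    · have h1 : word.length % 2 = 1 := by omega
      have hc : PySem.Int.mod (word.length : Int) 2 ≠ 0 := by rw [hm, h1]; decide
      rw [if_neg hc, if_neg hc]
      simp only [parFlip, he, if_false]
      simp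
  · rw [if_neg hok]
    have hf : (word.zip (0 :: preList 0 word)).all checkLetter = false :=
      eq_false_of_ne_true hok
    simp only [hf, Bool.false_and]
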